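-- pv_equiv track=rewrite | github.com/mihirpawarbsw/dynamic_one_dev | main_dashboard_server/pivot_time_period_functions.py | get_final_timeperiods_for_mat
-- ===== SOURCE A (Python) =====
-- def get_final_timeperiods_for_mat(cur_qtr, year):
--     qtrs = ['Q1', 'Q2', 'Q3', 'Q4']
--     i = 1
--     mat_qtrs = [f'{cur_qtr} {year}']
--
--     while i < 4:
--         if i == 1:
--             pre_qtr = cur_qtr
--         else:
--             pre_qtr = pre_qtr
--
--         key = qtrs.index(pre_qtr)
--
--         if key == 0:
--             pre_qtr = qtrs[-1]
--             year = year - 1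
--         else:
--             pre_qtr = get_prev_value(key, qtrs)
--
--         mat_qtrs.append(f'{pre_qtr} {year}')
--         i += 1
--
--     return mat_qtrs
--
-- def get_prev_value(key, array):
--     keys = list(range(len(array)))
--     found_index = keys.index(key)
--
--     if found_index is False or found_index == 0:
--         return False
--
--     return array[keys[found_index - 1]]
-- ===== SOURCE B (Python) =====
-- def get_final_timeperiods_for_mat(cur_qtr, year):
--     qtrs = ['Q1', 'Q2', 'Q3', 'Q4']
--     n = year * 4 + qtrs.index(cur_qtr)
--     return [f'{qtrs[(n - off) % 4]} {(n - off) // 4}' for off in range(4)]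
-- ===== Notes on version B (the rewrite author's own statement) =====
-- stated objective: simpler
-- what changed: Replaces the 4-step while loop with branchy wrap-around/year-decrement state (and the get_prev_value helper) by a single absolute quarter counter n = year*4 + index, producing each label branchlessly with (n-off)%4 and (n-off)//4.
import Mathlib
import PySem

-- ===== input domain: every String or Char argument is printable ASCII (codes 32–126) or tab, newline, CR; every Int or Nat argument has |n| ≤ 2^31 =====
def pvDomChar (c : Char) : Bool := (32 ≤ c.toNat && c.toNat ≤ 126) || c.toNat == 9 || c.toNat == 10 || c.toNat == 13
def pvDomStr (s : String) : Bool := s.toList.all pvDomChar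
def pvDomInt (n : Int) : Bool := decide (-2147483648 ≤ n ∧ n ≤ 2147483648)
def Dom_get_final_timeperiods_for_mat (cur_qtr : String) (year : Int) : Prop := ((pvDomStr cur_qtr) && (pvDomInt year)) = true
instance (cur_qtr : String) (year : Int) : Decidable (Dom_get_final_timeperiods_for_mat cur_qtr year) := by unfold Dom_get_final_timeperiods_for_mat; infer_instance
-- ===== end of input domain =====

-- B replaces A's branchy wrap-around loop state by divmod arithmetic on one absolute quarter counter (objective: simpler).

-- ===== PORT A =====
def get_prev_value (key : Int) (array : List String) : Option String :=
  let keys : List Int := PySem.List.pyRange 0 (array.length : Int) 1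
  match PySem.List.index? keys key with
  | none => none          -- Python: list.index raises ValueError here (unreachable for A's calls)
  | some found_index =>
    if found_index = 0 then none     -- Python returns False
    else PySem.List.pyGet? array ((PySem.List.pyGet? keys ((found_index : Int) - 1)).getD 0)

-- the while loop of A; fuel counts remaining iterations (i runs 1,2,3)
def matLoop (qtrs : List String) (fuel : Nat) (i : Int) (pre_qtr : String) (year : Int)
    (acc : List String) : List String :=
  match fuel with
  | 0 => acc
  | fuel + 1 =>
    if i < 4 then
      -- A's `if i == 1: pre_qtr = cur_qtr else: pre_qtr = pre_qtr` is a no-op on the carried state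
      match PySem.List.index? qtrs pre_qtr with
      | none => acc       -- Python: qtrs.index raises ValueError; excluded by Pre_
      | some key =>
        if (key : Int) = 0 then
          let pre_qtr' := (PySem.List.pyGet? qtrs (-1)).getD ""
          let year' := year - 1
          matLoop qtrs fuel (i + 1) pre_qtr' year' (acc ++ [pre_qtr' ++ " " ++ PySem.Int.toStr year'])
        else
          let pre_qtr' := (get_prev_value (key : Int) qtrs).getD "False"
          matLoop qtrs fuel (i + 1) pre_qtr' year (acc ++ [pre_qtr' ++ " " ++ PySem.Int.toStr year])
    else acc

def get_final_timeperiods_for_mat (cur_qtr : String) (year : Int) : List String :=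
  let qtrs := ["Q1", "Q2", "Q3", "Q4"]
  matLoop qtrs 3 1 cur_qtr year [cur_qtr ++ " " ++ PySem.Int.toStr year]

-- ===== PORT B =====
def get_final_timeperiods_for_mat_alt (cur_qtr : String) (year : Int) : List String :=
  let qtrs := ["Q1", "Q2", "Q3", "Q4"]
  match PySem.List.index? qtrs cur_qtr with
  | none => []            -- Python: qtrs.index raises ValueError; excluded by Pre_
  | some idx =>
    let n : Int := year * 4 + (idx : Int)
    (PySem.List.pyRange 0 4 1).map (fun off =>
      ((PySem.List.pyGet? qtrs (PySem.Int.mod (n - off) 4)).getD "") ++ " "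
        ++ PySem.Int.toStr (PySem.Int.floordiv (n - off) 4))

-- ===== PRECONDITION & SPEC =====
-- Pre_ excludes exactly the quarter strings outside Q1..Q4, on which Python A (and B) raise ValueError.
def Pre_get_final_timeperiods_for_mat (cur_qtr : String) (year : Int) : Prop :=
  cur_qtr = "Q1" ∨ cur_qtr = "Q2" ∨ cur_qtr = "Q3" ∨ cur_qtr = "Q4"
instance (cur_qtr : String) (year : Int) : Decidable (Pre_get_final_timeperiods_for_mat cur_qtr year) := by
  unfold Pre_get_final_timeperiods_for_mat; infer_instance

def pvWitness_get_final_timeperiods_for_mat : String × Int := ("Q2", 2023)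

def Spec_get_final_timeperiods_for_mat (cur_qtr : String) (year : Int) (out : List String) : Prop :=
  out = get_final_timeperiods_for_mat_alt cur_qtr year
instance (cur_qtr : String) (year : Int) (out : List String) :
    Decidable (Spec_get_final_timeperiods_for_mat cur_qtr year out) := by
  unfold Spec_get_final_timeperiods_for_mat; infer_instance

-- ===== CLAIM (what is proved, stated in full; the proofs are below) =====
def Claim_equal_get_final_timeperiods_for_mat : Prop :=
  ∀ (cur_qtr : String) (year : Int), Dom_get_final_timeperiods_for_mat cur_qtr year →
    Pre_get_final_timeperiods_for_mat cur_qtr year →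
    Spec_get_final_timeperiods_for_mat cur_qtr year (get_final_timeperiods_for_mat cur_qtr year)

-- ===== LEMMAS AND PROOFS =====

theorem mod_four (a : Int) : PySem.Int.mod a 4 = a % 4 :=
  PySem.Int.mod_eq_emod_of_pos (a := a) (b := 4) (by norm_num)

theorem fdiv_four (a : Int) : PySem.Int.floordiv a 4 = a / 4 :=
  PySem.Int.floordiv_eq_ediv_of_pos (a := a) (b := 4) (by norm_num)

theorem elemB (e q r : Int) (s : String)
    (hq : e % 4 = q) (hs : (PySem.List.pyGet? ["Q1","Q2","Q3","Q4"] q).getD "" = s)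
    (hr : e / 4 = r) :
    (PySem.List.pyGet? ["Q1","Q2","Q3","Q4"] (e % 4)).getD "" ++ " " ++ PySem.Int.toStr (e / 4)
      = s ++ " " ++ PySem.Int.toStr r := by rw [hq, hs, hr]

theorem evalA_Q1 (y : Int) : get_final_timeperiods_for_mat "Q1" y = ["Q1" ++ " " ++ PySem.Int.toStr y, "Q4" ++ " " ++ PySem.Int.toStr (y-1), "Q3" ++ " " ++ PySem.Int.toStr (y-1), "Q2" ++ " " ++ PySem.Int.toStr (y-1)] := rfl

theorem evalB_Q1 (y : Int) : get_final_timeperiods_for_mat_alt "Q1" y = ["Q1" ++ " " ++ PySem.Int.toStr y, "Q4" ++ " " ++ PySem.Int.toStr (y-1), "Q3" ++ " " ++ PySem.Int.toStr (y-1), "Q2" ++ " " ++ PySem.Int.toStr (y-1)] := by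
  simp only [get_final_timeperiods_for_mat_alt, PySem.List.index?]
  rw [show List.idxOf? "Q1" ["Q1", "Q2", "Q3", "Q4"] = some 0 from rfl,
      show PySem.List.pyRange 0 4 1 = [0,1,2,3] from rfl]
  simp only [List.map, mod_four, fdiv_four, List.cons.injEq, and_true]
  exact ⟨elemB _ 0 _ _ (by omega) rfl (by omega),
         elemB _ 3 _ _ (by omega) rfl (by omega),
         elemB _ 2 _ _ (by omega) rfl (by omega),
         elemB _ 1 _ _ (by omega) rfl (by omega)⟩

theorem evalA_Q2 (y : Int) : get_final_timeperiods_for_mat "Q2" y = ["Q2" ++ " " ++ PySem.Int.toStr y, "Q1" ++ " " ++ PySem.Int.toStr y, "Q4" ++ " " ++ PySem.Int.toStr (y-1), "Q3" ++ " " ++ PySem.Int.toStr (y-1)] := rfl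

theorem evalB_Q2 (y : Int) : get_final_timeperiods_for_mat_alt "Q2" y = ["Q2" ++ " " ++ PySem.Int.toStr y, "Q1" ++ " " ++ PySem.Int.toStr y, "Q4" ++ " " ++ PySem.Int.toStr (y-1), "Q3" ++ " " ++ PySem.Int.toStr (y-1)] := by
  simp only [get_final_timeperiods_for_mat_alt, PySem.List.index?]
  rw [show List.idxOf? "Q2" ["Q1", "Q2", "Q3", "Q4"] = some 1 from rfl,
      show PySem.List.pyRange 0 4 1 = [0,1,2,3] from rfl]
  simp only [List.map, mod_four, fdiv_four, List.cons.injEq, and_true]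
  exact ⟨elemB _ 1 _ _ (by omega) rfl (by omega),
         elemB _ 0 _ _ (by omega) rfl (by omega),
         elemB _ 3 _ _ (by omega) rfl (by omega),
         elemB _ 2 _ _ (by omega) rfl (by omega)⟩

theorem evalA_Q3 (y : Int) : get_final_timeperiods_for_mat "Q3" y = ["Q3" ++ " " ++ PySem.Int.toStr y, "Q2" ++ " " ++ PySem.Int.toStr y, "Q1" ++ " " ++ PySem.Int.toStr y, "Q4" ++ " " ++ PySem.Int.toStr (y-1)] := rfl

theorem evalB_Q3 (y : Int) : get_final_timeperiods_for_mat_alt "Q3" y = ["Q3" ++ " " ++ PySem.Int.toStr y, "Q2" ++ " " ++ PySem.Int.toStr y, "Q1" ++ " " ++ PySem.Int.toStr y, "Q4" ++ " " ++ PySem.Int.toStr (y-1)] := by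
  simp only [get_final_timeperiods_for_mat_alt, PySem.List.index?]
  rw [show List.idxOf? "Q3" ["Q1", "Q2", "Q3", "Q4"] = some 2 from rfl,
      show PySem.List.pyRange 0 4 1 = [0,1,2,3] from rfl]
  simp only [List.map, mod_four, fdiv_four, List.cons.injEq, and_true]
  exact ⟨elemB _ 2 _ _ (by omega) rfl (by omega),
         elemB _ 1 _ _ (by omega) rfl (by omega),
         elemB _ 0 _ _ (by omega) rfl (by omega),
         elemB _ 3 _ _ (by omega) rfl (by omega)⟩

theorem evalA_Q4 (y : Int) : get_final_timeperiods_for_mat "Q4" y = ["Q4" ++ " " ++ PySem.Int.toStr y, "Q3" ++ " " ++ PySem.Int.toStr y, "Q2" ++ " " ++ PySem.Int.toStr y, "Q1" ++ " " ++ PySem.Int.toStr y] := rfl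

theorem evalB_Q4 (y : Int) : get_final_timeperiods_for_mat_alt "Q4" y = ["Q4" ++ " " ++ PySem.Int.toStr y, "Q3" ++ " " ++ PySem.Int.toStr y, "Q2" ++ " " ++ PySem.Int.toStr y, "Q1" ++ " " ++ PySem.Int.toStr y] := by
  simp only [get_final_timeperiods_for_mat_alt, PySem.List.index?]
  rw [show List.idxOf? "Q4" ["Q1", "Q2", "Q3", "Q4"] = some 3 from rfl,
      show PySem.List.pyRange 0 4 1 = [0,1,2,3] from rfl]
  simp only [List.map, mod_four, fdiv_four, List.cons.injEq, and_true]
  exact ⟨elemB _ 3 _ _ (by omega) rfl (by omega),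
         elemB _ 2 _ _ (by omega) rfl (by omega),
         elemB _ 1 _ _ (by omega) rfl (by omega),
         elemB _ 0 _ _ (by omega) rfl (by omega)⟩

-- ===== VERDICT (by name: the statement is the Claim_ definition above) =====
theorem get_final_timeperiods_for_mat_spec : Claim_equal_get_final_timeperiods_for_mat := by
  intro cur_qtr year _ hpre
  unfold Spec_get_final_timeperiods_for_mat
  rcases hpre with h | h | h | h <;> subst h
  · rw [evalA_Q1, evalB_Q1]
  · rw [evalA_Q2, evalB_Q2]
  · rw [evalA_Q3, evalB_Q3]
  · rw [evalA_Q4, evalB_Q4]
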